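-- pv_equiv track=rewrite | github.com/cyborg001/aivideogen | tests/verify_rabbits.py | simulate_rabbits
-- ===== SOURCE A (Python) =====
-- def simulate_rabbits(months, maturity, lifespan):
--     """
--     Simulates rabbit population growth where:
--     - maturity: months until a pair becomes fertile (1 means fertile at month 1)
--     - lifespan: total months a pair lives before dying
--     """
--     # births[m] = number of pairs born in month m
--     births = [0] * (months + 1)
--     births[1] = 1 # Initial pair
--
--     population = [0] * (months + 1)
--
--     for m in range(1, months + 1):
--         # Current population = sum of active births
--         # A pair born at 'b' is alive in month 'm' if b <= m < b + lifespan
--         alive = 0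
--         for b in range(1, m + 1):
--             if b <= m < b + lifespan:
--                 alive += births[b]
--         population[m] = alive
--
--         # Calculate births for NEXT month (m+1)
--         # A pair born at 'b' reproduces if month m >= b + maturity - 1
--         # AND it is still alive (m < b + lifespan)
--         if m + 1 <= months:
--             new_births = 0
--             for b in range(1, m + 1):
--                 if m >= b + maturity - 1 and m < b + lifespan:
--                     new_births += births[b]
--             births[m+1] = new_births
--
--     return population[1:]
-- ===== SOURCE B (Python) =====
-- def simulate_rabbits(months, maturity, lifespan):
--     """O(months) re-implementation: prefix sums of births replace the two inner scans."""
--     births = [0] * (months + 1)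
--     births[1] = 1
--     S = [0] * (months + 1)  # S[k] = births[1] + ... + births[k]
--     population = []
--     for m in range(1, months + 1):
--         S[m] = S[m - 1] + births[m]
--         lo = min(m, max(0, m - lifespan))
--         population.append(S[m] - S[lo])
--         if m + 1 <= months:
--             hi = min(m, max(0, m - maturity + 1))
--             lo2 = min(hi, max(0, m - lifespan))
--             births[m + 1] = S[hi] - S[lo2]
--     return population
-- ===== Notes on version B (the rewrite author's own statement) =====
-- stated objective: faster
-- what changed: B keeps a running prefix-sum array of births and reads each month's alive count and next month's births as a difference of two clamped prefix sums, removing A's two O(m) inner scans per month.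
import Mathlib
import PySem

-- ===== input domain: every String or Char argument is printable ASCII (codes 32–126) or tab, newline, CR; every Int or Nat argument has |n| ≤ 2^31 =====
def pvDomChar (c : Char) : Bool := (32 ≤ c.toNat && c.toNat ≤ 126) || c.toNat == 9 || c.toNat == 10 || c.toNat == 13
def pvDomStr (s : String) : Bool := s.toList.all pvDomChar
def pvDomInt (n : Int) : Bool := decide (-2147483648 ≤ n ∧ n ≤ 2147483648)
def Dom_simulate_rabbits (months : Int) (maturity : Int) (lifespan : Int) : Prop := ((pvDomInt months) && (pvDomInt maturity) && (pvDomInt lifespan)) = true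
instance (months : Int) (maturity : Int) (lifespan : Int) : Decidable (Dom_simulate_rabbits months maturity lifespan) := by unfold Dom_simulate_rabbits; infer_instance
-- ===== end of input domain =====

-- B replaces A's two O(m) inner scans per month by a running prefix-sum array of births
-- (sliding-window differences), turning O(months^2) into O(months); equivalence proved on months ≥ 1.

-- ===== PORT A =====
-- inner loop `for b in range(1, m+1): if b <= m < b + lifespan: alive += births[b]`
def pvASumAlive (births : List Int) (lifespan : Int) (m : Nat) : Int :=
  (List.range m).foldl (fun acc (i : Nat) =>
    if ((i : Int) + 1 ≤ (m : Int) ∧ (m : Int) < (i : Int) + 1 + lifespan) then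
      acc + births.getD (i + 1) 0 else acc) 0

-- inner loop `for b in range(1, m+1): if m >= b + maturity - 1 and m < b + lifespan: new_births += births[b]`
def pvASumBirths (births : List Int) (maturity lifespan : Int) (m : Nat) : Int :=
  (List.range m).foldl (fun acc (i : Nat) =>
    if ((m : Int) ≥ (i : Int) + 1 + maturity - 1 ∧ (m : Int) < (i : Int) + 1 + lifespan) then
      acc + births.getD (i + 1) 0 else acc) 0

-- the `for m in range(1, months+1)` loop, state = (births, population)
def pvALoop (maturity lifespan : Int) (n m : Nat) (births pop : List Int) : List Int × List Int :=
  if m ≤ n then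
    let pop' := pop.set m (pvASumAlive births lifespan m)
    let births' := if m + 1 ≤ n then births.set (m + 1) (pvASumBirths births maturity lifespan m)
                   else births
    pvALoop maturity lifespan n (m + 1) births' pop'
  else (births, pop)
termination_by n + 1 - m
decreasing_by omega

def simulate_rabbits (months : Int) (maturity : Int) (lifespan : Int) : List Int :=
  if months < 1 then []  -- `births[1] = 1` raises IndexError in Python; excluded by Pre_
  else
    let n := months.toNat
    let births := (List.replicate (n + 1) (0 : Int)).set 1 1
    let pop := List.replicate (n + 1) (0 : Int)
    ((pvALoop maturity lifespan n 1 births pop).2).drop 1  -- population[1:]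

-- ===== PORT B =====
-- the single `for m in range(1, months+1)` loop of Source B, state = (births, S, population)
def pvBLoop (maturity lifespan : Int) (n m : Nat) (births S pop : List Int) : List Int :=
  if m ≤ n then
    let S' := S.set m (S.getD (m - 1) 0 + births.getD m 0)
    let lo : Nat := min m (max 0 ((m : Int) - lifespan)).toNat
    let pop' := pop ++ [S'.getD m 0 - S'.getD lo 0]
    let births' := if m + 1 ≤ n then
        let hi : Nat := min m (max 0 ((m : Int) - maturity + 1)).toNat
        let lo2 : Nat := min hi (max 0 ((m : Int) - lifespan)).toNat
        births.set (m + 1) (S'.getD hi 0 - S'.getD lo2 0)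
      else births
    pvBLoop maturity lifespan n (m + 1) births' S' pop'
  else pop
termination_by n + 1 - m
decreasing_by omega

def simulate_rabbits_alt (months : Int) (maturity : Int) (lifespan : Int) : List Int :=
  if months < 1 then []  -- `births[1] = 1` raises IndexError in Python; excluded by Pre_
  else
    let n := months.toNat
    let births := (List.replicate (n + 1) (0 : Int)).set 1 1
    let S := List.replicate (n + 1) (0 : Int)
    pvBLoop maturity lifespan n 1 births S []

-- ===== PRECONDITION & SPEC =====
-- Pre_ excludes months ≤ 0, on which A (and B) raise IndexError at `births[1] = 1`.
def Pre_simulate_rabbits (months : Int) (maturity : Int) (lifespan : Int) : Prop := 1 ≤ months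
instance (months : Int) (maturity : Int) (lifespan : Int) : Decidable (Pre_simulate_rabbits months maturity lifespan) := by unfold Pre_simulate_rabbits; infer_instance
def pvWitness_simulate_rabbits : Int × Int × Int := (6, 3, 4)

def Spec_simulate_rabbits (months : Int) (maturity : Int) (lifespan : Int) (out : List Int) : Prop := out = simulate_rabbits_alt months maturity lifespan
instance (months : Int) (maturity : Int) (lifespan : Int) (out : List Int) : Decidable (Spec_simulate_rabbits months maturity lifespan out) := by unfold Spec_simulate_rabbits; infer_instance

-- ===== CLAIM (what is proved, stated in full; the proofs are below) =====
def Claim_equal_simulate_rabbits : Prop := ∀ (months : Int) (maturity : Int) (lifespan : Int), Dom_simulate_rabbits months maturity lifespan → Pre_simulate_rabbits months maturity lifespan → Spec_simulate_rabbits months maturity lifespan (simulate_rabbits months maturity lifespan)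

-- ===== LEMMAS AND PROOFS =====

-- Reference birth sequence: pvBirth (m+1) = pairs born in month m+1 (fertile-and-alive sum at month m).
def pvBirth (mat lif : Int) : Nat → Int
  | 0 => 0
  | 1 => 1
  | m + 2 =>
    ∑ i ∈ (Finset.range (m + 1)).attach,
      if ((m : Int) + 1 ≥ (i.1 : Int) + 1 + mat - 1 ∧ (m : Int) + 1 < (i.1 : Int) + 1 + lif) then
        pvBirth mat lif (i.1 + 1) else 0
decreasing_by
  have := Finset.mem_range.mp i.2; omega

-- prefix sums of pvBirth starting at index 1
def pvPS (mat lif : Int) (k : Nat) : Int := ∑ i ∈ Finset.range k, pvBirth mat lif (i + 1)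

def pvPop (mat lif : Int) (m : Nat) : Int :=
  pvPS mat lif m - pvPS mat lif (min m (max 0 ((m : Int) - lif)).toNat)

lemma pvBirth_succ (mat lif : Int) (m : Nat) (hm : 1 ≤ m) :
    pvBirth mat lif (m + 1) =
      ∑ i ∈ Finset.range m,
        if ((m : Int) ≥ (i : Int) + 1 + mat - 1 ∧ (m : Int) < (i : Int) + 1 + lif) then
          pvBirth mat lif (i + 1) else 0 := by
  obtain ⟨k, rfl⟩ : ∃ k, m = k + 1 := ⟨m - 1, by omega⟩
  rw [show k + 1 + 1 = k + 2 from rfl, pvBirth, ← Finset.sum_attach (Finset.range (k + 1))]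
  push_cast
  ring_nf
  refine Finset.sum_congr rfl fun x _ => ?_
  congr 1
  rw [eq_iff_iff]
  constructor <;> (rintro ⟨h1, h2⟩; exact ⟨by omega, by omega⟩)

lemma pv_foldl_if_sum (m : Nat) (p : Nat → Prop) [DecidablePred p] (g : Nat → Int) (a : Int) :
    (List.range m).foldl (fun acc i => if p i then acc + g i else acc) a
      = a + ∑ i ∈ Finset.range m, if p i then g i else 0 := by
  induction m generalizing a with
  | zero => simp
  | succ m ih =>
    rw [List.range_succ, List.foldl_append, Finset.sum_range_succ, ih]
    simp only [List.foldl_cons, List.foldl_nil]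
    split_ifs <;> ring

lemma pv_window (f : Nat → Int) (m : Nat) (L U : Int) :
    (∑ i ∈ Finset.range m, if (L < (i : Int) + 1 ∧ (i : Int) + 1 ≤ U) then f (i + 1) else 0)
      = (∑ i ∈ Finset.range (min m (max 0 U).toNat), f (i + 1))
        - (∑ i ∈ Finset.range (min (min m (max 0 U).toNat) (max 0 L).toNat), f (i + 1)) := by
  set u := min m (max 0 U).toNat with hu
  set l := min u (max 0 L).toNat with hl
  have hlu : l ≤ u := by omega
  have hum : u ≤ m := by omega
  rw [← Finset.sum_Ico_eq_sub _ hlu]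
  have : ∀ i ∈ Finset.range m,
      (if (L < (i : Int) + 1 ∧ (i : Int) + 1 ≤ U) then f (i + 1) else 0)
        = (if i ∈ Finset.Ico l u then f (i + 1) else 0) := by
    intro i hi
    have him := Finset.mem_range.mp hi
    congr 1
    simp only [Finset.mem_Ico]
    rw [eq_iff_iff]
    constructor
    · rintro ⟨h1, h2⟩; omega
    · rintro ⟨h1, h2⟩; omega
  rw [Finset.sum_congr rfl this, Finset.sum_ite_mem]
  congr 1
  rw [Finset.inter_eq_right]
  intro i hi
  simp only [Finset.mem_Ico] at hi
  exact Finset.mem_range.mpr (by omega)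

lemma pv_alive_eq (mat lif : Int) (m : Nat) :
    (∑ i ∈ Finset.range m,
        if ((i : Int) + 1 ≤ (m : Int) ∧ (m : Int) < (i : Int) + 1 + lif) then
          pvBirth mat lif (i + 1) else 0)
      = pvPop mat lif m := by
  have h : ∀ i ∈ Finset.range m,
      (if ((i : Int) + 1 ≤ (m : Int) ∧ (m : Int) < (i : Int) + 1 + lif) then pvBirth mat lif (i + 1) else 0)
        = (if ((m : Int) - lif < (i : Int) + 1 ∧ (i : Int) + 1 ≤ (m : Int)) then pvBirth mat lif (i + 1) else 0) := by
    intro i hi; congr 1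
    rw [eq_iff_iff]
    constructor
    · rintro ⟨h1, h2⟩; omega
    · rintro ⟨h1, h2⟩; omega
  rw [Finset.sum_congr rfl h, pv_window]
  have h1 : min m (max 0 (m : Int)).toNat = m := by omega
  rw [pvPop, pvPS, pvPS, h1]

lemma pv_birth_window (mat lif : Int) (m : Nat) (hm : 1 ≤ m) :
    pvBirth mat lif (m + 1)
      = pvPS mat lif (min m (max 0 ((m : Int) - mat + 1)).toNat)
        - pvPS mat lif (min (min m (max 0 ((m : Int) - mat + 1)).toNat) (max 0 ((m : Int) - lif)).toNat) := by
  rw [pvBirth_succ mat lif m hm]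
  have h : ∀ i ∈ Finset.range m,
      (if ((m : Int) ≥ (i : Int) + 1 + mat - 1 ∧ (m : Int) < (i : Int) + 1 + lif) then pvBirth mat lif (i + 1) else 0)
        = (if ((m : Int) - lif < (i : Int) + 1 ∧ (i : Int) + 1 ≤ (m : Int) - mat + 1) then pvBirth mat lif (i + 1) else 0) := by
    intro i hi; congr 1
    rw [eq_iff_iff]
    constructor
    · rintro ⟨h1, h2⟩; omega
    · rintro ⟨h1, h2⟩; omega
  rw [Finset.sum_congr rfl h, pv_window]
  rfl

lemma pvPS_succ (mat lif : Int) (m : Nat) :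
    pvPS mat lif (m + 1) = pvPS mat lif m + pvBirth mat lif (m + 1) := by
  rw [pvPS, pvPS, Finset.sum_range_succ]

-- A-side loop invariant
lemma pv_getD_set_other {l : List Int} {i j : Nat} (h : i ≠ j) (v : Int) :
    (l.set i v).getD j 0 = l.getD j 0 := by
  rw [List.getD_eq_getElem?_getD, List.getElem?_set_ne h, ← List.getD_eq_getElem?_getD]

lemma pv_getD_set_self {l : List Int} {i : Nat} (h : i < l.length) (v : Int) :
    (l.set i v).getD i 0 = v := by
  rw [List.getD_eq_getElem?_getD, List.getElem?_set_self h, Option.getD_some]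

lemma pvALoop_inv (mat lif : Int) (n : Nat) (m : Nat) (births pop : List Int)
    (hm : 1 ≤ m) (hmn : m ≤ n + 1)
    (hblen : births.length = n + 1)
    (hb : ∀ b, b ≤ m → b ≤ n → births.getD b 0 = pvBirth mat lif b)
    (hplen : pop.length = n + 1)
    (hp : ∀ j, j < m → pop.getD j 0 = if j = 0 then 0 else pvPop mat lif j) :
    (pvALoop mat lif n m births pop).2.length = n + 1 ∧
    ∀ j, j ≤ n → (pvALoop mat lif n m births pop).2.getD j 0
        = if j = 0 then 0 else pvPop mat lif j := by
  generalize hk : n + 1 - m = k at *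
  induction k generalizing m births pop with
  | zero =>
    rw [pvALoop, if_neg (by omega)]
    refine ⟨hplen, fun j hj => ?_⟩
    exact hp j (by omega)
  | succ k ih =>
    have hmn' : m ≤ n := by omega
    have halive : pvASumAlive births lif m = pvPop mat lif m := by
      rw [pvASumAlive, pv_foldl_if_sum, zero_add, ← pv_alive_eq mat lif m]
      refine Finset.sum_congr rfl fun i hi => ?_
      have him := Finset.mem_range.mp hi
      split_ifs with h
      · rw [hb (i + 1) (by omega) (by omega)]
      · rfl
    have hblen' : (if m + 1 ≤ n then births.set (m + 1) (pvASumBirths births mat lif m)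
        else births).length = n + 1 := by
      split_ifs with h
      · simp [hblen]
      · exact hblen
    have hb' : ∀ b, b ≤ m + 1 → b ≤ n →
        (if m + 1 ≤ n then births.set (m + 1) (pvASumBirths births mat lif m)
          else births).getD b 0 = pvBirth mat lif b := by
      intro b hb1 hb2
      split_ifs with h
      · by_cases hbe : b = m + 1
        · subst hbe
          rw [pv_getD_set_self (by omega)]
          rw [pvASumBirths, pv_foldl_if_sum, zero_add, pvBirth_succ mat lif m hm]
          refine Finset.sum_congr rfl fun i hi => ?_
          have him := Finset.mem_range.mp hi
          split_ifs with hc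
          · rw [hb (i + 1) (by omega) (by omega)]
          · rfl
        · rw [pv_getD_set_other (by omega)]
          exact hb b (by omega) hb2
      · exact hb b (by omega) hb2
    have hplen' : (pop.set m (pvASumAlive births lif m)).length = n + 1 := by simp [hplen]
    have hp' : ∀ j, j < m + 1 → (pop.set m (pvASumAlive births lif m)).getD j 0
        = if j = 0 then 0 else pvPop mat lif j := by
      intro j hj
      by_cases hje : j = m
      · subst hje
        rw [pv_getD_set_self (by omega), halive, if_neg (by omega)]
      · rw [pv_getD_set_other (by omega)]
        exact hp j (by omega)
    rw [pvALoop, if_pos hmn']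
    exact ih (m + 1) _ _ (by omega) (by omega) hblen' hb' hplen' hp' (by omega)

-- B-side loop invariant
lemma pvBLoop_inv (mat lif : Int) (n : Nat) (m : Nat) (births S pop : List Int)
    (hm : 1 ≤ m) (hmn : m ≤ n + 1)
    (hblen : births.length = n + 1)
    (hb : ∀ b, b ≤ m → b ≤ n → births.getD b 0 = pvBirth mat lif b)
    (hslen : S.length = n + 1)
    (hs : ∀ k, k < m → S.getD k 0 = pvPS mat lif k)
    (hpop : pop = (List.range (m - 1)).map (fun i => pvPop mat lif (i + 1))) :
    pvBLoop mat lif n m births S pop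
      = (List.range n).map (fun i => pvPop mat lif (i + 1)) := by
  generalize hk : n + 1 - m = k at *
  induction k generalizing m births S pop with
  | zero =>
    rw [pvBLoop, if_neg (by omega), hpop]
    have hmn0 : m - 1 = n := by omega
    rw [hmn0]
  | succ k ih =>
    have hmn' : m ≤ n := by omega
    have hs' : ∀ j, j ≤ m →
        (S.set m (S.getD (m - 1) 0 + births.getD m 0)).getD j 0 = pvPS mat lif j := by
      intro j hj
      by_cases hje : j = m
      · subst hje
        rw [pv_getD_set_self (by omega)]
        obtain ⟨j', rfl⟩ : ∃ j', j = j' + 1 := ⟨j - 1, by omega⟩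
        simp only [Nat.add_sub_cancel]
        rw [hs j' (by omega), hb (j' + 1) (by omega) (by omega), pvPS_succ]
      · rw [pv_getD_set_other (by omega)]
        exact hs j (by omega)
    have hslen' : (S.set m (S.getD (m - 1) 0 + births.getD m 0)).length = n + 1 := by
      simp [hslen]
    have hblen' : (if m + 1 ≤ n then
        births.set (m + 1)
          ((S.set m (S.getD (m - 1) 0 + births.getD m 0)).getD
              (min m (max 0 ((m : Int) - mat + 1)).toNat) 0 -
            (S.set m (S.getD (m - 1) 0 + births.getD m 0)).getD
              (min (min m (max 0 ((m : Int) - mat + 1)).toNat) (max 0 ((m : Int) - lif)).toNat) 0)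
        else births).length = n + 1 := by
      split_ifs with h
      · simp [hblen]
      · exact hblen
    have hb' : ∀ b, b ≤ m + 1 → b ≤ n →
        (if m + 1 ≤ n then
          births.set (m + 1)
            ((S.set m (S.getD (m - 1) 0 + births.getD m 0)).getD
                (min m (max 0 ((m : Int) - mat + 1)).toNat) 0 -
              (S.set m (S.getD (m - 1) 0 + births.getD m 0)).getD
                (min (min m (max 0 ((m : Int) - mat + 1)).toNat) (max 0 ((m : Int) - lif)).toNat) 0)
          else births).getD b 0 = pvBirth mat lif b := by
      intro b hb1 hb2
      split_ifs with h
      · by_cases hbe : b = m + 1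
        · subst hbe
          rw [pv_getD_set_self (by omega), hs' _ (by omega), hs' _ (by omega)]
          exact (pv_birth_window mat lif m hm).symm
        · rw [pv_getD_set_other (by omega)]
          exact hb b (by omega) hb2
      · exact hb b (by omega) hb2
    have hpop' : pop ++ [(S.set m (S.getD (m - 1) 0 + births.getD m 0)).getD m 0 -
          (S.set m (S.getD (m - 1) 0 + births.getD m 0)).getD
            (min m (max 0 ((m : Int) - lif)).toNat) 0]
        = (List.range (m + 1 - 1)).map (fun i => pvPop mat lif (i + 1)) := by
      rw [hpop, hs' m (le_refl m), hs' _ (by omega)]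
      obtain ⟨m', rfl⟩ : ∃ m', m = m' + 1 := ⟨m - 1, by omega⟩
      simp only [Nat.add_sub_cancel]
      rw [List.range_succ, List.map_append]
      simp only [List.map_cons, List.map_nil]
      rfl
    rw [pvBLoop, if_pos hmn']
    exact ih (m + 1) _ _ _ (by omega) (by omega) hblen' hb'
      hslen' (fun j hj => hs' j (by omega)) hpop' (by omega)

lemma pv_init_births (n : Nat) (hn : 1 ≤ n) (mat lif : Int) :
    ∀ b, b ≤ 1 → b ≤ n →
      ((List.replicate (n + 1) (0 : Int)).set 1 1).getD b 0 = pvBirth mat lif b := by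
  intro b hb1 _
  interval_cases b
  · rw [pv_getD_set_other (by omega)]
    simp [pvBirth]
  · rw [pv_getD_set_self (by simp; omega)]
    simp [pvBirth]

lemma pv_portA_eq (months mat lif : Int) (h : 1 ≤ months) :
    simulate_rabbits months mat lif
      = (List.range months.toNat).map (fun i => pvPop mat lif (i + 1)) := by
  rw [simulate_rabbits, if_neg (by omega)]
  simp only
  set n := months.toNat with hn
  have hn1 : 1 ≤ n := by omega
  obtain ⟨hlen, hval⟩ := pvALoop_inv mat lif n 1
      ((List.replicate (n + 1) (0 : Int)).set 1 1) (List.replicate (n + 1) (0 : Int))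
      (le_refl 1) (by omega) (by simp) (pv_init_births n hn1 mat lif)
      (by simp) (by intro j hj; interval_cases j; simp)
  apply List.ext_getElem
  · simp [hlen]
  · intro i h1 h2
    have hi : i < n := by simp [hlen] at h1; omega
    have hgd := hval (i + 1) (by omega)
    rw [if_neg (by omega)] at hgd
    have hget : (pvALoop mat lif n 1 ((List.replicate (n + 1) (0 : Int)).set 1 1)
          (List.replicate (n + 1) (0 : Int))).2.getD (i + 1) 0
        = (pvALoop mat lif n 1 ((List.replicate (n + 1) (0 : Int)).set 1 1)
          (List.replicate (n + 1) (0 : Int))).2[i + 1]'(by omega) :=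
      List.getD_eq_getElem _ _ (by omega)
    rw [List.getElem_drop, List.getElem_map, List.getElem_range]
    have h3 : 1 + i = i + 1 := by omega
    simp only [h3]
    rw [← hget, hgd]

lemma pv_portB_eq (months mat lif : Int) (h : 1 ≤ months) :
    simulate_rabbits_alt months mat lif
      = (List.range months.toNat).map (fun i => pvPop mat lif (i + 1)) := by
  rw [simulate_rabbits_alt, if_neg (by omega)]
  simp only
  set n := months.toNat with hn
  have hn1 : 1 ≤ n := by omega
  exact pvBLoop_inv mat lif n 1
      ((List.replicate (n + 1) (0 : Int)).set 1 1) (List.replicate (n + 1) (0 : Int)) []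
      (le_refl 1) (by omega) (by simp) (pv_init_births n hn1 mat lif)
      (by simp) (by intro k hk; interval_cases k; simp [pvPS]) (by simp)

-- ===== VERDICT (by name: the statement is the Claim_ definition above) =====
theorem simulate_rabbits_spec : Claim_equal_simulate_rabbits := by
  intro months maturity lifespan _ hpre
  unfold Spec_simulate_rabbits
  rw [pv_portA_eq months maturity lifespan hpre, pv_portB_eq months maturity lifespan hpre]
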